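-- pv_equiv track=rewrite | github.com/Nuynaselr/PyProject | work/statistics/GetStatistics.py | create_true_list_table
-- ===== SOURCE A (Python) =====
-- exclusive_tables = ['2019_10_12_23_03', '', '']
--
-- def create_true_list_table(list_tables):
--     true_list_tables = {}
--     for element in list_tables:
--         split_row = [str(x) for x in element.split('_')]
--         if split_row[1] in true_list_tables and element not in exclusive_tables:
--             true_list_tables.get(split_row[1]).append(element)
--         elif element not in exclusive_tables:
--             true_list_tables[split_row[1]] = [element]
--     return true_list_tables
-- ===== SOURCE B (Python) =====
-- exclusive_tables = ['2019_10_12_23_03', '', '']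
--
-- def create_true_list_table(list_tables):
--     # key-major grouping: compute every key first, then collect per distinct key
--     pairs = [(element.split('_')[1], element) for element in list_tables]
--     kept = [(key, element) for key, element in pairs if element not in exclusive_tables]
--     result = {}
--     for key in dict.fromkeys(key for key, _ in kept):
--         result[key] = [element for k, element in kept if k == key]
--     return result
-- ===== Notes on version B (the rewrite author's own statement) =====
-- stated objective: alternative
-- what changed: A grows groups element-by-element in a dict during one pass; B computes all (key, element) pairs up front, filters out exclusive tables, and builds each group key-major with one scan per distinct key.
import Mathlib
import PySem

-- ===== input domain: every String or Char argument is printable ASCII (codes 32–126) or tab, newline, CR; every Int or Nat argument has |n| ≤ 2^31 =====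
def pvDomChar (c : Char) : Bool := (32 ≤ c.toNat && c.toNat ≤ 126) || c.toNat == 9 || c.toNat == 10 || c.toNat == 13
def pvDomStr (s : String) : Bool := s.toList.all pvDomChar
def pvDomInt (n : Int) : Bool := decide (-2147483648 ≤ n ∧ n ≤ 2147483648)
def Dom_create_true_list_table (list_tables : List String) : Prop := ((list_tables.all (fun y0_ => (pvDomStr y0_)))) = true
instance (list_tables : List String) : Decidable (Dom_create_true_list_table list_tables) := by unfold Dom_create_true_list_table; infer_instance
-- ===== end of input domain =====

-- B replaces A's element-major hash grouping with a key-major construction: compute all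
-- (key, element) pairs, drop exclusives, then build each group by one scan per distinct key
-- (objective: alternative). A mutates nothing observable; equivalence is about the return value.


-- ===== PORT A =====
def pvExclusiveTables : List String := ["2019_10_12_23_03", "", ""]

-- literal transliteration of A: one pass, a dict keyed by split_row[1], append or start a group
def create_true_list_table (list_tables : List String) : List (String × List String) :=
  (list_tables.foldl
    (fun true_list_tables element =>
      let split_row := ((PySem.Str.split? element "_").getD []).map (fun x => x)
      -- split_row[1]: Pre_ guarantees index 1 is in range (Python raises IndexError otherwise)
      let k := PySem.List.pyGetD split_row 1 ""
      if true_list_tables.contains k && !(pvExclusiveTables.contains element) then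
        true_list_tables.insert k (true_list_tables.getD k [] ++ [element])
      else if !(pvExclusiveTables.contains element) then
        true_list_tables.insert k [element]
      else true_list_tables)
    PySem.Dict.empty).items

-- ===== PORT B =====
-- literal transliteration of B (Source B): pairs, filter, distinct keys, one scan per key
def create_true_list_table_alt (list_tables : List String) : List (String × List String) :=
  let pairs := list_tables.map
    (fun element => (PySem.List.pyGetD ((PySem.Str.split? element "_").getD []) 1 "", element))
  let kept := pairs.filter (fun p => !(pvExclusiveTables.contains p.2))
  (PySem.List.dedup (kept.map (·.1))).map
    (fun key => (key, (kept.filter (fun p => p.1 == key)).map (·.2)))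

-- ===== PRECONDITION & SPEC =====
-- Pre_ excludes exactly the inputs containing an element whose '_'-split has fewer than two
-- fields (e.g. '' or 'abc'): there Python A raises IndexError on split_row[1].
def Pre_create_true_list_table (list_tables : List String) : Prop :=
  ∀ e ∈ list_tables, 2 ≤ ((PySem.Str.split? e "_").getD []).length
instance (list_tables : List String) : Decidable (Pre_create_true_list_table list_tables) := by
  unfold Pre_create_true_list_table; infer_instance
def pvWitness_create_true_list_table : List String :=
  ["a_b", "a_c", "2019_10_12_23_03", "x_y", "a_b"]
def Spec_create_true_list_table (list_tables : List String) (out : List (String × List String)) : Prop := out = create_true_list_table_alt list_tables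
instance (list_tables : List String) (out : List (String × List String)) : Decidable (Spec_create_true_list_table list_tables out) := by unfold Spec_create_true_list_table; infer_instance

-- ===== CLAIM (what is proved, stated in full; the proofs are below) =====
def Claim_equal_create_true_list_table : Prop := ∀ (list_tables : List String), Dom_create_true_list_table list_tables → Pre_create_true_list_table list_tables → Spec_create_true_list_table list_tables (create_true_list_table list_tables)

-- ===== LEMMAS AND PROOFS =====

-- the key expression both ports share
def pvKey (element : String) : String :=
  PySem.List.pyGetD ((PySem.Str.split? element "_").getD []) 1 ""

-- the kept (key, element) pairs of a list
def pvKept (list_tables : List String) : List (String × String) :=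
  (list_tables.map (fun e => (pvKey e, e))).filter (fun p => !(pvExclusiveTables.contains p.2))

-- A's loop step equals: skip exclusives, else modify-append at the key
theorem pvStep_eq (d : PySem.Dict String (List String)) (element : String) :
    (let split_row := ((PySem.Str.split? element "_").getD []).map (fun x => x)
     let k := PySem.List.pyGetD split_row 1 ""
     if d.contains k && !(pvExclusiveTables.contains element) then
       d.insert k (d.getD k [] ++ [element])
     else if !(pvExclusiveTables.contains element) then
       d.insert k [element]
     else d)
    = if pvExclusiveTables.contains element then d
      else d.modify (pvKey element) [] (· ++ [element]) := by
  simp only [List.map_id_fun', id, pvKey]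
  by_cases hex : element ∈ pvExclusiveTables
  · simp [hex]
  · by_cases hc : d.contains (PySem.List.pyGetD ((PySem.Str.split? element "_").getD []) 1 "") = true
    · simp [hex, hc, PySem.Dict.modify]
    · simp [hex, hc, PySem.Dict.modify,
        PySem.Dict.getD_of_not_contains d [] (by simpa using hc)]

-- A's whole fold is the modify-append fold over the kept pairs
theorem pvFold_eq (list_tables : List String) (d : PySem.Dict String (List String)) :
    list_tables.foldl
      (fun true_list_tables element =>
        let split_row := ((PySem.Str.split? element "_").getD []).map (fun x => x)
        let k := PySem.List.pyGetD split_row 1 ""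
        if true_list_tables.contains k && !(pvExclusiveTables.contains element) then
          true_list_tables.insert k (true_list_tables.getD k [] ++ [element])
        else if !(pvExclusiveTables.contains element) then
          true_list_tables.insert k [element]
        else true_list_tables) d
    = (pvKept list_tables).foldl (fun d p => d.modify p.1 [] (· ++ [p.2])) d := by
  induction list_tables generalizing d with
  | nil => rfl
  | cons e rest ih =>
    simp only [List.foldl_cons, pvKept, List.map_cons, List.filter_cons]
    rw [pvStep_eq]
    by_cases hex : pvExclusiveTables.contains e
    · simp only [hex, if_pos, Bool.not_true]
      simpa [pvKept] using ih d
    · simp only [hex, Bool.not_false, if_pos]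
      simpa [pvKept] using ih (d.modify (pvKey e) [] (· ++ [e]))

theorem create_true_list_table_spec : Claim_equal_create_true_list_table := by
  intro list_tables _ _
  unfold Spec_create_true_list_table create_true_list_table create_true_list_table_alt
  rw [pvFold_eq]
  have hnd : ((pvKept list_tables).foldl
      (fun d p => d.modify p.1 [] (· ++ [p.2])) PySem.Dict.empty).keys.Nodup := by
    exact PySem.Dict.nodup_keys_foldl_modify_key _ _ _ _ _ (by simp [pysem])
  rw [PySem.Dict.items_eq_map_keys _ hnd []]
  rw [PySem.Dict.keys_foldl_modify_key]
  simp only [PySem.Dict.keys_empty, PySem.Set.update_nil_left, ← PySem.List.dedup_eq_ofList]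
  have hgetD : ∀ k, ((pvKept list_tables).foldl
      (fun d p => d.modify p.1 [] (· ++ [p.2])) PySem.Dict.empty).getD k []
      = ((pvKept list_tables).filter (fun p => p.1 == k)).map (·.2) := by
    intro k
    rw [PySem.Dict.getD_foldl_modify_append]
    simp [pysem]
  simp only [hgetD]
  rfl
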